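-- pv_equiv track=rewrite | github.com/microsoft/knossos-ksc | src/python/ksc/expr_utils.py | _concat_map_values
-- ===== SOURCE A (Python) =====
-- from typing import FrozenSet, Mapping, Sequence, TypeVar
--
-- T = TypeVar("T")
--
-- def _concat_map_values(
--     maps: Sequence[Mapping[str, Sequence[T]]]
-- ) -> Mapping[str, Sequence[T]]:
--     res = {}
--     for m in maps:
--         for key, value_list in m.items():
--             res.setdefault(key, []).extend(value_list)
--     return res
-- ===== SOURCE B (Python) =====
-- def _concat_map_values(maps):
--     keys = dict.fromkeys(k for m in maps for k in m)
--     return {k: [v for m in maps if k in m for v in m[k]] for k in keys}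
-- ===== Notes on version B (the rewrite author's own statement) =====
-- stated objective: alternative
-- what changed: Replaces the streaming setdefault/extend accumulation with a group-by-key fill: collect all keys in first-appearance order once, then build each key's concatenated value list by scanning the maps per key.
import Mathlib
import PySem

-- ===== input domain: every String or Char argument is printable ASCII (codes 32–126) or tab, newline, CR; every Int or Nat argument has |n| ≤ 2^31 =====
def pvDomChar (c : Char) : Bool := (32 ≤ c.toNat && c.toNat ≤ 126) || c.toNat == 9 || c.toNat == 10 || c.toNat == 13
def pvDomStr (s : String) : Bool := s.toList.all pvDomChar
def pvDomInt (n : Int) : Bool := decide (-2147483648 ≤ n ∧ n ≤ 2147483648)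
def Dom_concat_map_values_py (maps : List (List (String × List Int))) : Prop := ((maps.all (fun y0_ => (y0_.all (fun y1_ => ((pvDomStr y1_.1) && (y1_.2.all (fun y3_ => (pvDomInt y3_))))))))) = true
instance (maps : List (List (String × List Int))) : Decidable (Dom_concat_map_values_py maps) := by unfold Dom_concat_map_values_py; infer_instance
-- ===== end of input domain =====

-- B replaces A's streaming setdefault/extend accumulation with a group-by-key fill
-- (keys collected once in first-appearance order, then per-key scan of the maps): alternative decomposition, same result.


-- ===== PORT A =====
-- res = {}; for m in maps: for key, value_list in m.items(): res.setdefault(key, []).extend(value_list)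
-- (setdefault+extend in place = res[key] = res.get(key, []) + value_list = Dict.modify)
def concat_map_values_py (maps : List (List (String × List Int))) : List (String × List Int) :=
  (maps.foldl
    (fun res m => m.foldl (fun res p => res.modify p.1 [] (· ++ p.2)) res)
    (PySem.Dict.empty : PySem.Dict String (List Int))).items

-- ===== PORT B =====
-- keys = dict.fromkeys(k for m in maps for k in m); {k: [v for m in maps if k in m for v in m[k]] for k in keys}
def concat_map_values_py_alt (maps : List (List (String × List Int))) : List (String × List Int) :=
  let keys := PySem.List.dedup (maps.flatMap (fun m => m.map Prod.fst))
  keys.map (fun k =>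
    (k, (maps.filter (fun m => (PySem.Dict.mk m).contains k)).flatMap
          (fun m => (PySem.Dict.mk m).getD k [])))

-- ===== PRECONDITION & SPEC =====
-- Pre_: each inner association list has pairwise-distinct keys — exactly the lists that represent a
-- Python dict (a dict argument of A can never carry a duplicate key, so this excludes nothing A accepts).
def Pre_concat_map_values_py (maps : List (List (String × List Int))) : Prop :=
  ∀ m ∈ maps, (m.map Prod.fst).Nodup
instance (maps : List (List (String × List Int))) : Decidable (Pre_concat_map_values_py maps) := by unfold Pre_concat_map_values_py; infer_instance
def pvWitness_concat_map_values_py : (List (List (String × List Int))) :=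
  [[("a", [1, 2])], [("a", [3]), ("b", [])]]
def Spec_concat_map_values_py (maps : List (List (String × List Int))) (out : List (String × List Int)) : Prop := out = concat_map_values_py_alt maps
instance (maps : List (List (String × List Int))) (out : List (String × List Int)) : Decidable (Spec_concat_map_values_py maps out) := by unfold Spec_concat_map_values_py; infer_instance

-- ===== CLAIM (what is proved, stated in full; the proofs are below) =====
def Claim_equal_concat_map_values_py : Prop := ∀ (maps : List (List (String × List Int))), Dom_concat_map_values_py maps → Pre_concat_map_values_py maps → Spec_concat_map_values_py maps (concat_map_values_py maps)

-- ===== LEMMAS AND PROOFS =====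

-- the streamed entry list
def pvEntries (maps : List (List (String × List Int))) : List (String × List Int) :=
  maps.flatMap id

theorem pv_nested_foldl (maps : List (List (String × List Int)))
    (d : PySem.Dict String (List Int)) :
    maps.foldl (fun res m => m.foldl (fun res p => res.modify p.1 [] (· ++ p.2)) res) d
      = (pvEntries maps).foldl (fun res p => res.modify p.1 [] (· ++ p.2)) d := by
  induction maps generalizing d with
  | nil => rfl
  | cons m rest ih => simp [pvEntries, List.foldl_append, ih]

theorem pv_getD_foldl_modify_extend (l : List (String × List Int))
    (d : PySem.Dict String (List Int)) (c : String) :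
    (l.foldl (fun res p => res.modify p.1 [] (· ++ p.2)) d).getD c []
      = d.getD c [] ++ ((l.filter (fun p => p.1 == c)).map (·.2)).flatten := by
  induction l generalizing d with
  | nil => simp
  | cons p rest ih =>
      simp only [List.foldl_cons, ih, List.filter_cons]
      by_cases h : p.1 = c
      · simp [h]
      · simp [h, PySem.Dict.getD_modify, Ne.symm h]

theorem pv_keys_foldl_modify (l : List (String × List Int)) :
    ((l.foldl (fun res p => res.modify p.1 [] (· ++ p.2)) (PySem.Dict.empty : PySem.Dict String (List Int))).keys)
      = PySem.List.dedup (l.map Prod.fst) := by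
  rw [show (fun (res : PySem.Dict String (List Int)) (p : String × List Int) => res.modify p.1 [] (· ++ p.2))
        = (fun res p => res.modify (Prod.fst p) [] (· ++ p.2)) from rfl]
  rw [PySem.Dict.keys_foldl_modify_key]
  simp [PySem.Set.update, PySem.Dict.keys_empty, PySem.List.dedup_eq_ofList, PySem.Set.ofList_eq_foldl]

theorem pv_nodup_keys_foldl (l : List (String × List Int)) :
    ((l.foldl (fun res p => res.modify p.1 [] (· ++ p.2)) (PySem.Dict.empty : PySem.Dict String (List Int))).keys).Nodup := by
  exact PySem.Dict.nodup_keys_foldl_modify_key l Prod.fst [] (fun (_ : PySem.Dict String (List Int)) (p : String × List Int) (v : List Int) => v ++ p.2) _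
    PySem.Dict.nodup_keys_empty

-- B's per-key scan over the maps equals the filter over the streamed entries, given Nodup keys per map
theorem pv_collect_eq (maps : List (List (String × List Int)))
    (h : ∀ m ∈ maps, (m.map Prod.fst).Nodup) (k : String) :
    (maps.filter (fun m => (PySem.Dict.mk m).contains k)).flatMap
        (fun m => (PySem.Dict.mk m).getD k [])
      = (((pvEntries maps).filter (fun p => p.1 == k)).map (·.2)).flatten := by
  induction maps with
  | nil => rfl
  | cons m rest ih =>
      have hm := h m (by simp)
      have hrest := ih (fun m' hm' => h m' (by simp [hm']))
      simp only [pvEntries, List.flatMap_cons, id, List.filter_append, List.map_append,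
        List.flatten_append, List.filter_cons]
      rw [← pvEntries]
      rw [← hrest]
      by_cases hc : (PySem.Dict.mk m).contains k
      · simp only [hc]
        -- getD of the single matching entry
        clear hrest ih h
        induction m with
        | nil => simp [PySem.Dict.contains] at hc
        | cons p pm ihm =>
            by_cases hp : p.1 = k
            · have : (pm.filter (fun q => q.1 == k)) = [] := by
                rw [List.filter_eq_nil_iff]
                intro q hq
                simp only [List.map_cons, List.nodup_cons] at hm
                have := hm.1
                simp only [beq_iff_eq]
                intro hqk
                exact this (hp ▸ hqk ▸ List.mem_map_of_mem hq)
              simp [hp, this, PySem.Dict.getD, PySem.Dict.get?]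
            · have hc' : (PySem.Dict.mk pm).contains k := by
                simpa [PySem.Dict.contains, hp] using hc
              have hm' : (pm.map Prod.fst).Nodup := by
                simp only [List.map_cons, List.nodup_cons] at hm; exact hm.2
              have := ihm hm' hc'
              simpa [hp, PySem.Dict.getD, PySem.Dict.get?, Ne.symm hp] using this
      · simp only [hc]
        have : (m.filter (fun p => p.1 == k)) = [] := by
          rw [List.filter_eq_nil_iff]
          intro p hp hpk
          apply hc
          simp only [beq_iff_eq] at hpk
          simp [PySem.Dict.contains]
          exact ⟨p.2, hpk ▸ hp⟩
        simp [this]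

theorem pv_map_fst_entries (maps : List (List (String × List Int))) :
    (pvEntries maps).map Prod.fst = maps.flatMap (fun m => m.map Prod.fst) := by
  simp [pvEntries, List.flatMap_def]

-- ===== VERDICT (by name: the statement is the Claim_ definition above) =====
theorem concat_map_values_py_spec : Claim_equal_concat_map_values_py := by
  intro maps _ hpre
  unfold Spec_concat_map_values_py concat_map_values_py concat_map_values_py_alt
  rw [pv_nested_foldl]
  rw [PySem.Dict.items_eq_map_keys _ (pv_nodup_keys_foldl _) []]
  rw [pv_keys_foldl_modify, pv_map_fst_entries]
  apply List.map_congr_left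
  intro k _
  rw [pv_getD_foldl_modify_extend, pv_collect_eq maps hpre k]
  simp
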